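-- pv_equiv track=rewrite | github.com/SreevaniPedaballi/DSA | Recursion/Arrays/Binary_Search.py | Find_target_without_list_input
-- ===== SOURCE A (Python) =====
-- def Find_target_without_list_input(arr,target,s_idx):
--     ans_list=[]
--     if s_idx >=len(arr):
--         return ans_list
--     if arr[s_idx]==target:
--         ans_list.append(s_idx)
--     pre_ans_list=Find_target_without_list_input(arr,target,s_idx+1)
--     ans_list.extend(pre_ans_list)
--     return ans_list
-- ===== SOURCE B (Python) =====
-- def Find_target_without_list_input(arr, target, s_idx):
--     ans_list = []
--     for i in range(s_idx, len(arr)):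
--         if arr[i] == target:
--             ans_list.append(i)
--     return ans_list
-- ===== Notes on version B (the rewrite author's own statement) =====
-- stated objective: idiomatic
-- what changed: Replaced the recursive helper that rebuilds and extends a fresh list at every call depth with a single iterative scan over range(s_idx, len(arr)) appending matching indices to one accumulator.
import Mathlib
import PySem

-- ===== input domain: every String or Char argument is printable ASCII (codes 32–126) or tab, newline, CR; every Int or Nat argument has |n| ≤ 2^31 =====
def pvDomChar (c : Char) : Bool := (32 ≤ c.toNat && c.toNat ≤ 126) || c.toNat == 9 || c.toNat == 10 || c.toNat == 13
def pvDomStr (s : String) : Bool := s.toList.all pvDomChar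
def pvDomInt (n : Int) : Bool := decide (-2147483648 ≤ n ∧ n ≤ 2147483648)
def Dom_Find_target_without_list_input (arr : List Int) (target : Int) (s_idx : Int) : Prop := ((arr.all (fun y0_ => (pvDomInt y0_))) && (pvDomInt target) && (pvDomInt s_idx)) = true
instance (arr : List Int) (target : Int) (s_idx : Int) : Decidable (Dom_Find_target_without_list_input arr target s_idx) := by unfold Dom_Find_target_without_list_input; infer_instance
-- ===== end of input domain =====

-- B replaces A's recursion (fresh list built and extended at each depth) with one iterative scan appending matches; idiomatic, same O(n) cost.


-- ===== PORT A =====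
def Find_target_without_list_input (arr : List Int) (target : Int) (s_idx : Int) : List Int :=
  if _h : s_idx ≥ (arr.length : Int) then []
  else
    (if PySem.List.pyGet? arr s_idx = some target then [s_idx] else [])
      ++ Find_target_without_list_input arr target (s_idx + 1)
termination_by ((arr.length : Int) - s_idx).toNat
decreasing_by omega

-- ===== PORT B =====
def Find_target_without_list_input_alt (arr : List Int) (target : Int) (s_idx : Int) : List Int :=
  (PySem.List.pyRange s_idx (arr.length : Int) 1).foldl
    (fun acc i => if PySem.List.pyGet? arr i = some target then acc ++ [i] else acc) []

-- ===== PRECONDITION & SPEC =====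
-- Pre_ excludes exactly the inputs where Python A raises IndexError: s_idx < -len(arr)
-- (both A and B raise there, via the negative-index access arr[s_idx] / arr[i]).
def Pre_Find_target_without_list_input (arr : List Int) (target : Int) (s_idx : Int) : Prop :=
  -(arr.length : Int) ≤ s_idx
instance (arr : List Int) (target : Int) (s_idx : Int) : Decidable (Pre_Find_target_without_list_input arr target s_idx) := by unfold Pre_Find_target_without_list_input; infer_instance
def pvWitness_Find_target_without_list_input : List Int × Int × Int := ([1, 2, 1], 1, 0)

def Spec_Find_target_without_list_input (arr : List Int) (target : Int) (s_idx : Int) (out : List Int) : Prop := out = Find_target_without_list_input_alt arr target s_idx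
instance (arr : List Int) (target : Int) (s_idx : Int) (out : List Int) : Decidable (Spec_Find_target_without_list_input arr target s_idx out) := by unfold Spec_Find_target_without_list_input; infer_instance

-- ===== CLAIM (what is proved, stated in full; the proofs are below) =====
def Claim_equal_Find_target_without_list_input : Prop := ∀ (arr : List Int) (target : Int) (s_idx : Int), Dom_Find_target_without_list_input arr target s_idx → Pre_Find_target_without_list_input arr target s_idx → Spec_Find_target_without_list_input arr target s_idx (Find_target_without_list_input arr target s_idx)

-- ===== LEMMAS AND PROOFS =====
-- A computes the filtered range, for every s_idx (the ports are total).
theorem findA_eq_filter (arr : List Int) (target : Int) (s_idx : Int) :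
    Find_target_without_list_input arr target s_idx
      = (PySem.List.pyRange s_idx (arr.length : Int) 1).filter
          (fun i => decide (PySem.List.pyGet? arr i = some target)) := by
  fun_induction Find_target_without_list_input arr target s_idx with
  | case1 s h =>
      rw [PySem.List.pyRange_one_eq_nil (by omega)]
      rfl
  | case2 s h ih =>
      rw [PySem.List.pyRange_one_cons (by omega), List.filter_cons, ← ih]
      by_cases hp : PySem.List.pyGet? arr s = some target <;> simp [hp]

theorem Find_target_without_list_input_spec : Claim_equal_Find_target_without_list_input := by
  intro arr target s_idx _ _
  unfold Spec_Find_target_without_list_input Find_target_without_list_input_alt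
  rw [findA_eq_filter, PySem.List.foldl_append_ite_eq_filter]
  simp
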